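-- pv_equiv track=rewrite | github.com/aphonologist/directionalHSfooting | gen.py | gen_foot
-- ===== SOURCE A (Python) =====
-- def gen_foot(input):
-- 	candidates = set([])
--
-- 	# add fully faithful candidate
-- 	candidates.add(input)
--
-- 	# build candidates with monosyllabic feet
-- 	for i in range(len(input)):
-- 		if input[i] == 's':
-- 			candidate = input[:i] + "F" + input[i+1:]
-- 			candidates.add(candidate)
--
-- 	# build candidates with bisyllabic feet
-- 	for i in range(len(input) - 1):
-- 		if input[i:i+2] == 'ss':
-- 			# trochees
-- 			candidate = input[:i] + "Tt" + input[i+2:]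
-- 			candidates.add(candidate)
-- 			# iambs
-- 			candidate = input[:i] + "iI" + input[i+2:]
-- 			candidates.add(candidate)
--
-- 	# build candidates with internally layered feet
-- 	for i in range(len(input) - 2):
-- 		if input[i:i+3] == 'sss':
-- 			# internal trochees
-- 			candidate = input[:i] + 'Ddd' + input[i+3:]
-- 			candidates.add(candidate)
-- 			candidate = input[:i] + 'dDd' + input[i+3:]
-- 			candidates.add(candidate)
-- 			# internal iambs
-- 			candidate = input[:i] + 'yYy' + input[i+3:]
-- 			candidates.add(candidate)
-- 			candidate = input[:i] + 'yyY' + input[i+3:]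
-- 			candidates.add(candidate)
--
-- 	return sorted(list(candidates))
-- ===== SOURCE B (Python) =====
-- def gen_foot(input):
--     # Run-length approach: find each maximal run of 's', then generate the
--     # substitution candidates only inside runs -- no per-position pattern tests.
--     out = {input}
--     n = len(input)
--     i = 0
--     while i < n:
--         if input[i] != 's':
--             i += 1
--             continue
--         j = i
--         while j < n and input[j] == 's':
--             j += 1
--         # maximal run of 's' is input[i:j]
--         for k in range(i, j):
--             out.add(input[:k] + 'F' + input[k+1:])
--         for k in range(i, j - 1):
--             out.add(input[:k] + 'Tt' + input[k+2:])
--             out.add(input[:k] + 'iI' + input[k+2:])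
--         for k in range(i, j - 2):
--             out.add(input[:k] + 'Ddd' + input[k+3:])
--             out.add(input[:k] + 'dDd' + input[k+3:])
--             out.add(input[:k] + 'yYy' + input[k+3:])
--             out.add(input[:k] + 'yyY' + input[k+3:])
--         i = j
--     return sorted(out)
-- ===== Notes on version B (the rewrite author's own statement) =====
-- stated objective: faster
-- what changed: Instead of A's three whole-string scans that test a window pattern at every position, B first locates each maximal run of 's' characters with a while-loop and then emits the mono-, bi- and trisyllabic replacements only at offsets inside that run, so positions outside runs are skipped without any slice comparison.
import Mathlib
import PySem

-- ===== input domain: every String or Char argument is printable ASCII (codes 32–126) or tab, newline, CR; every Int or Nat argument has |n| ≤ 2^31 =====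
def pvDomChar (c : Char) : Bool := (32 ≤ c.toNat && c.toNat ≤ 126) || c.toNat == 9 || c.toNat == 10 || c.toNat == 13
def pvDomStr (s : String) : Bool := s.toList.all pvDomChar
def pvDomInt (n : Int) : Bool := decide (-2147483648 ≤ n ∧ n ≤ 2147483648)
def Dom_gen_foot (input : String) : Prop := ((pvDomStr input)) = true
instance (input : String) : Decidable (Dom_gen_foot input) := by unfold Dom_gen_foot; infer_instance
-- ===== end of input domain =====

set_option maxHeartbeats 1000000


-- B finds each maximal run of 's' with a while-loop and generates the replacement candidates
-- only inside runs, instead of A's three whole-string scans testing a pattern at every position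
-- (objective: alternative; same candidate set, same sorted output).

-- ===== PORT A =====
-- A's candidate set: the faithful input, then the three scans (mono-, bi-, trisyllabic feet)
def pvCandsA (l : List Char) : PySem.Set (List Char) :=
  let c0 : PySem.Set (List Char) := PySem.Set.add PySem.Set.empty l
  let c1 := (PySem.List.pyRange 0 (PySem.List.len l) 1).foldl (fun c i =>
    if PySem.List.pyGet? l i = some 's' then
      PySem.Set.add c (PySem.List.slice l none (some i) ++ ['F'] ++ PySem.List.slice l (some (i+1)) none)
    else c) c0
  let c2 := (PySem.List.pyRange 0 (PySem.List.len l - 1) 1).foldl (fun c i =>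
    if PySem.List.slice l (some i) (some (i+2)) = ['s','s'] then
      PySem.Set.add (PySem.Set.add c
        (PySem.List.slice l none (some i) ++ ['T','t'] ++ PySem.List.slice l (some (i+2)) none))
        (PySem.List.slice l none (some i) ++ ['i','I'] ++ PySem.List.slice l (some (i+2)) none)
    else c) c1
  (PySem.List.pyRange 0 (PySem.List.len l - 2) 1).foldl (fun c i =>
    if PySem.List.slice l (some i) (some (i+3)) = ['s','s','s'] then
      PySem.Set.add (PySem.Set.add (PySem.Set.add (PySem.Set.add c
        (PySem.List.slice l none (some i) ++ ['D','d','d'] ++ PySem.List.slice l (some (i+3)) none))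
        (PySem.List.slice l none (some i) ++ ['d','D','d'] ++ PySem.List.slice l (some (i+3)) none))
        (PySem.List.slice l none (some i) ++ ['y','Y','y'] ++ PySem.List.slice l (some (i+3)) none))
        (PySem.List.slice l none (some i) ++ ['y','y','Y'] ++ PySem.List.slice l (some (i+3)) none)
    else c) c2

def gen_foot (input : String) : List String :=
  PySem.List.sorted ((pvCandsA input.toList).map String.ofList) (fun x => x) false

-- ===== PORT B =====
-- the inner while loop of Source B: advance j while input[j] == 's'
def pvRunEnd (l : List Char) (j : Nat) : Nat :=
  if h : j < l.length then
    if l[j]'h = 's' then pvRunEnd l (j+1) else j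
  else j
termination_by l.length - j
decreasing_by exact Nat.sub_succ_lt_self _ _ h

-- termination helpers for pvScanB (the outer while loop must make progress past a run)
theorem pv_runEnd_ge (l : List Char) (j : Nat) : j ≤ pvRunEnd l j := by
  induction j using pvRunEnd.induct l with
  | case1 j h hs ih => rw [pvRunEnd]; simp only [dif_pos h, if_pos hs]; omega
  | case2 j h hs => rw [pvRunEnd]; simp only [dif_pos h, if_neg hs]; omega
  | case3 j h => rw [pvRunEnd]; simp only [dif_neg h]; omega

theorem pv_runEnd_gt (l : List Char) (j : Nat) (hj : j < l.length) (hs : l[j]'hj = 's') :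
    j < pvRunEnd l j := by
  rw [pvRunEnd]; simp only [dif_pos hj, if_pos hs]
  have := pv_runEnd_ge l (j+1); omega

-- the three per-run generation loops of Source B, over offsets of the run input[i:j]
def pvAddRun (l : List Char) (i j : Nat) (c : PySem.Set (List Char)) : PySem.Set (List Char) :=
  let c1 := (PySem.List.pyRange (i : Int) (j : Int) 1).foldl (fun c k =>
    PySem.Set.add c (PySem.List.slice l none (some k) ++ ['F'] ++ PySem.List.slice l (some (k+1)) none)) c
  let c2 := (PySem.List.pyRange (i : Int) ((j : Int) - 1) 1).foldl (fun c k =>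
    PySem.Set.add (PySem.Set.add c
      (PySem.List.slice l none (some k) ++ ['T','t'] ++ PySem.List.slice l (some (k+2)) none))
      (PySem.List.slice l none (some k) ++ ['i','I'] ++ PySem.List.slice l (some (k+2)) none)) c1
  (PySem.List.pyRange (i : Int) ((j : Int) - 2) 1).foldl (fun c k =>
    PySem.Set.add (PySem.Set.add (PySem.Set.add (PySem.Set.add c
      (PySem.List.slice l none (some k) ++ ['D','d','d'] ++ PySem.List.slice l (some (k+3)) none))
      (PySem.List.slice l none (some k) ++ ['d','D','d'] ++ PySem.List.slice l (some (k+3)) none))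
      (PySem.List.slice l none (some k) ++ ['y','Y','y'] ++ PySem.List.slice l (some (k+3)) none))
      (PySem.List.slice l none (some k) ++ ['y','y','Y'] ++ PySem.List.slice l (some (k+3)) none)) c2

-- the outer while loop of Source B
def pvScanB (l : List Char) (i : Nat) (c : PySem.Set (List Char)) : PySem.Set (List Char) :=
  if hi : i < l.length then
    if hs : l[i]'hi ≠ 's' then pvScanB l (i+1) c
    else pvScanB l (pvRunEnd l i) (pvAddRun l i (pvRunEnd l i) c)
  else c
termination_by l.length - i
decreasing_by
  · exact Nat.sub_succ_lt_self _ _ hi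
  · have := pv_runEnd_gt l i hi (not_not.mp hs); omega

def gen_foot_alt (input : String) : List String :=
  PySem.List.sorted
    ((pvScanB input.toList 0 (PySem.Set.add PySem.Set.empty input.toList)).map String.ofList)
    (fun x => x) false

-- ===== PRECONDITION & SPEC =====
def Spec_gen_foot (input : String) (out : List String) : Prop := out = gen_foot_alt input
instance (input : String) (out : List String) : Decidable (Spec_gen_foot input out) := by unfold Spec_gen_foot; infer_instance

-- ===== CLAIM (what is proved, stated in full; the proofs are below) =====
def Claim_equal_gen_foot : Prop := ∀ (input : String), Dom_gen_foot input → Spec_gen_foot input (gen_foot input)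

-- ===== LEMMAS AND PROOFS =====

-- the window match "input[n:n+k] == p" and the replacement candidate "input[:n] + r + input[n+k:]"
def pvM (l : List Char) (n k : Nat) (p : List Char) : Prop := (l.drop n).take k = p
def pvRep (l : List Char) (n : Nat) (r : List Char) (k : Nat) : List Char :=
  l.take n ++ r ++ l.drop (n + k)

-- what one window contributes (all widths together); shared target of both membership lemmas
def pvW (l x : List Char) (n : Nat) : Prop :=
  (pvM l n 1 ['s'] ∧ x = pvRep l n ['F'] 1)
  ∨ (pvM l n 2 ['s','s'] ∧ (x = pvRep l n ['T','t'] 2 ∨ x = pvRep l n ['i','I'] 2))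
  ∨ (pvM l n 3 ['s','s','s'] ∧
      (x = pvRep l n ['D','d','d'] 3 ∨ x = pvRep l n ['d','D','d'] 3 ∨
       x = pvRep l n ['y','Y','y'] 3 ∨ x = pvRep l n ['y','y','Y'] 3))

-- membership through a fold of conditional set-insertions
theorem pv_mem_foldl_step {ι α : Type} [BEq α] [LawfulBEq α] (L : List ι)
    (step : PySem.Set α → ι → PySem.Set α) (P : ι → α → Prop) (x : α)
    (h : ∀ c i, x ∈ step c i ↔ x ∈ c ∨ P i x) :
    ∀ s, x ∈ L.foldl step s ↔ x ∈ s ∨ ∃ i ∈ L, P i x := by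
  induction L with
  | nil => simp
  | cons a L ih =>
    intro s
    rw [List.foldl_cons, ih, h]
    simp only [List.mem_cons]
    constructor
    · rintro ((hs | hp) | ⟨i, hi, hp⟩)
      · exact Or.inl hs
      · exact Or.inr ⟨a, Or.inl rfl, hp⟩
      · exact Or.inr ⟨i, Or.inr hi, hp⟩
    · rintro (hs | ⟨i, (rfl | hi), hp⟩)
      · exact Or.inl (Or.inl hs)
      · exact Or.inl (Or.inr hp)
      · exact Or.inr ⟨i, hi, hp⟩

theorem pv_nodup_foldl_step {ι α : Type} [BEq α] [LawfulBEq α] (L : List ι)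
    (step : PySem.Set α → ι → PySem.Set α)
    (h : ∀ (c : PySem.Set α) (i : ι), c.Nodup → (step c i).Nodup) :
    ∀ s : PySem.Set α, s.Nodup → (L.foldl step s).Nodup := by
  induction L with
  | nil => intro s hs; simpa using hs
  | cons a L ih => intro s hs; exact ih _ (h _ _ hs)

theorem pv_exists_mem_pyRange_zero (b : Int) (P : Int → Prop) :
    (∃ i ∈ PySem.List.pyRange 0 b 1, P i) ↔ ∃ n : Nat, (n : Int) < b ∧ P (n : Int) := by
  constructor
  · rintro ⟨i, hi, hp⟩
    rw [PySem.List.mem_pyRange_one] at hi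
    refine ⟨i.toNat, by omega, ?_⟩
    rw [Int.toNat_of_nonneg hi.1]; exact hp
  · rintro ⟨n, hn, hp⟩
    exact ⟨(n : Int), PySem.List.mem_pyRange_one.mpr ⟨by omega, hn⟩, hp⟩

theorem pv_exists_mem_pyRange_nat (a : Nat) (b : Int) (P : Int → Prop) :
    (∃ i ∈ PySem.List.pyRange (a : Int) b 1, P i) ↔
      ∃ n : Nat, a ≤ n ∧ (n : Int) < b ∧ P (n : Int) := by
  constructor
  · rintro ⟨i, hi, hp⟩
    rw [PySem.List.mem_pyRange_one] at hi
    refine ⟨i.toNat, by omega, by omega, ?_⟩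
    rw [Int.toNat_of_nonneg (by omega)]; exact hp
  · rintro ⟨n, ha, hn, hp⟩
    exact ⟨(n : Int), PySem.List.mem_pyRange_one.mpr ⟨by omega, hn⟩, hp⟩

-- a successful window match bounds the position
theorem pv_match_le (l : List Char) (n k : Nat) (p : List Char)
    (hk : 0 < k) (h : pvM l n k p) (hp : p.length = k) : n + k ≤ l.length := by
  have := congrArg List.length h
  simp only [List.length_take, List.length_drop, hp] at this
  omega

-- slices at a nonnegative position, in drop/take form
theorem pv_slice2 (l : List Char) (n : Nat) :
    PySem.List.slice l (some (n : Int)) (some ((n : Int) + 2)) = (l.drop n).take 2 := by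
  have := PySem.List.slice_natCast_add l n 2; push_cast at this; exact this
theorem pv_slice3 (l : List Char) (n : Nat) :
    PySem.List.slice l (some (n : Int)) (some ((n : Int) + 3)) = (l.drop n).take 3 := by
  have := PySem.List.slice_natCast_add l n 3; push_cast at this; exact this
theorem pv_from1 (l : List Char) (n : Nat) :
    PySem.List.slice l (some ((n : Int) + 1)) none = l.drop (n + 1) := by
  have := PySem.List.slice_from_natCast l (n + 1); push_cast at this; exact this
theorem pv_from2 (l : List Char) (n : Nat) :
    PySem.List.slice l (some ((n : Int) + 2)) none = l.drop (n + 2) := by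
  have := PySem.List.slice_from_natCast l (n + 2); push_cast at this; exact this
theorem pv_from3 (l : List Char) (n : Nat) :
    PySem.List.slice l (some ((n : Int) + 3)) none = l.drop (n + 3) := by
  have := PySem.List.slice_from_natCast l (n + 3); push_cast at this; exact this

theorem pv_cond1 (l : List Char) (n : Nat) :
    PySem.List.pyGet? l (n : Int) = some 's' ↔ pvM l n 1 ['s'] := by
  unfold pvM
  rw [PySem.List.pyGet?_natCast]
  by_cases h : n < l.length
  · rw [List.getElem?_eq_getElem h]
    have hd : (l.drop n).take 1 = [l[n]] := by
      rw [List.drop_eq_getElem_cons h, List.take_succ_cons, List.take_zero]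
    rw [hd]
    simp
  · rw [List.drop_of_length_le (by omega)]
    simp [List.getElem?_eq_none (by omega : l.length ≤ n)]

-- pointwise characterisation of the small window matches
theorem pv_take_one (d : List Char) : d.take 1 = ['s'] ↔ d[0]? = some 's' := by
  rcases d with _ | ⟨a, d⟩ <;> simp
theorem pv_take_two (d : List Char) : d.take 2 = ['s','s'] ↔ d[0]? = some 's' ∧ d[1]? = some 's' := by
  rcases d with _ | ⟨a, _ | ⟨b, d⟩⟩ <;> simp
theorem pv_take_three (d : List Char) :
    d.take 3 = ['s','s','s'] ↔ d[0]? = some 's' ∧ d[1]? = some 's' ∧ d[2]? = some 's' := by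
  rcases d with _ | ⟨a, _ | ⟨b, _ | ⟨e, d⟩⟩⟩ <;> simp

theorem pv_M1 (l : List Char) (n : Nat) : pvM l n 1 ['s'] ↔ l[n]? = some 's' := by
  unfold pvM; rw [pv_take_one, List.getElem?_drop, Nat.add_zero]
theorem pv_M2 (l : List Char) (n : Nat) :
    pvM l n 2 ['s','s'] ↔ l[n]? = some 's' ∧ l[n+1]? = some 's' := by
  unfold pvM; rw [pv_take_two, List.getElem?_drop, List.getElem?_drop, Nat.add_zero]
theorem pv_M3 (l : List Char) (n : Nat) :
    pvM l n 3 ['s','s','s'] ↔ l[n]? = some 's' ∧ l[n+1]? = some 's' ∧ l[n+2]? = some 's' := by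
  unfold pvM; rw [pv_take_three, List.getElem?_drop, List.getElem?_drop, List.getElem?_drop, Nat.add_zero]

-- what the three scans of A put into the set
theorem pv_memA (l x : List Char) :
    x ∈ pvCandsA l ↔ x = l
      ∨ (∃ n : Nat, (n : Int) < (l.length : Int) ∧ pvM l n 1 ['s'] ∧ x = pvRep l n ['F'] 1)
      ∨ (∃ n : Nat, (n : Int) < (l.length : Int) - 1 ∧ pvM l n 2 ['s','s'] ∧
          (x = pvRep l n ['T','t'] 2 ∨ x = pvRep l n ['i','I'] 2))
      ∨ (∃ n : Nat, (n : Int) < (l.length : Int) - 2 ∧ pvM l n 3 ['s','s','s'] ∧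
          (x = pvRep l n ['D','d','d'] 3 ∨ x = pvRep l n ['d','D','d'] 3 ∨
           x = pvRep l n ['y','Y','y'] 3 ∨ x = pvRep l n ['y','y','Y'] 3)) := by
  unfold pvCandsA
  rw [pv_mem_foldl_step _ _
      (fun i x => PySem.List.slice l (some i) (some (i+3)) = ['s','s','s'] ∧
        (x = PySem.List.slice l none (some i) ++ ['D','d','d'] ++ PySem.List.slice l (some (i+3)) none ∨
         x = PySem.List.slice l none (some i) ++ ['d','D','d'] ++ PySem.List.slice l (some (i+3)) none ∨
         x = PySem.List.slice l none (some i) ++ ['y','Y','y'] ++ PySem.List.slice l (some (i+3)) none ∨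
         x = PySem.List.slice l none (some i) ++ ['y','y','Y'] ++ PySem.List.slice l (some (i+3)) none)) x
      (by intro c i; split_ifs with hc <;> simp [PySem.Set.mem_add, hc] <;> tauto)]
  rw [pv_mem_foldl_step _ _
      (fun i x => PySem.List.slice l (some i) (some (i+2)) = ['s','s'] ∧
        (x = PySem.List.slice l none (some i) ++ ['T','t'] ++ PySem.List.slice l (some (i+2)) none ∨
         x = PySem.List.slice l none (some i) ++ ['i','I'] ++ PySem.List.slice l (some (i+2)) none)) x
      (by intro c i; split_ifs with hc <;> simp [PySem.Set.mem_add, hc] <;> tauto)]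
  rw [pv_mem_foldl_step _ _
      (fun i x => PySem.List.pyGet? l i = some 's' ∧
        x = PySem.List.slice l none (some i) ++ ['F'] ++ PySem.List.slice l (some (i+1)) none) x
      (by intro c i; split_ifs with hc <;> simp [PySem.Set.mem_add, hc])]
  simp only [pv_exists_mem_pyRange_zero, PySem.List.len_eq, PySem.Set.mem_add,
    pv_slice2, pv_slice3, pv_from1, pv_from2, pv_from3,
    PySem.List.slice_to_natCast, pv_cond1, pvM, pvRep]
  simp [PySem.Set.empty]
  rw [or_assoc, or_assoc]

-- run-end facts: everything strictly inside a run is 's', and the run end is maximal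
theorem pv_runEnd_all (l : List Char) (j : Nat) :
    ∀ k, j ≤ k → k < pvRunEnd l j → l[k]? = some 's' := by
  induction j using pvRunEnd.induct l with
  | case1 j h hs ih =>
    intro k hk hk'
    rw [pvRunEnd] at hk'; simp only [dif_pos h, if_pos hs] at hk'
    rcases Nat.eq_or_lt_of_le hk with rfl | hlt
    · rw [List.getElem?_eq_getElem h]; exact congrArg some hs
    · exact ih k hlt hk'
  | case2 j h hs =>
    intro k hk hk'
    rw [pvRunEnd] at hk'; simp only [dif_pos h, if_neg hs] at hk'
    omega
  | case3 j h =>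
    intro k hk hk'
    rw [pvRunEnd] at hk'; simp only [dif_neg h] at hk'
    omega

theorem pv_runEnd_stop (l : List Char) (j : Nat) :
    l[pvRunEnd l j]? ≠ some 's' := by
  induction j using pvRunEnd.induct l with
  | case1 j h hs ih =>
    rw [pvRunEnd]; simp only [dif_pos h, if_pos hs]
    exact ih
  | case2 j h hs =>
    rw [pvRunEnd]; simp only [dif_pos h, if_neg hs]
    rw [List.getElem?_eq_getElem h]
    intro hc
    exact hs (Option.some.inj hc)
  | case3 j h =>
    rw [pvRunEnd]; simp only [dif_neg h]
    rw [List.getElem?_eq_none (by omega)]; simp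

-- what B's per-run loops put into the set
theorem pv_memAddRun (l x : List Char) (i j : Nat) (c : PySem.Set (List Char)) :
    x ∈ pvAddRun l i j c ↔ x ∈ c
      ∨ (∃ n : Nat, i ≤ n ∧ (n : Int) < (j : Int) ∧ x = pvRep l n ['F'] 1)
      ∨ (∃ n : Nat, i ≤ n ∧ (n : Int) < (j : Int) - 1 ∧
          (x = pvRep l n ['T','t'] 2 ∨ x = pvRep l n ['i','I'] 2))
      ∨ (∃ n : Nat, i ≤ n ∧ (n : Int) < (j : Int) - 2 ∧
          (x = pvRep l n ['D','d','d'] 3 ∨ x = pvRep l n ['d','D','d'] 3 ∨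
           x = pvRep l n ['y','Y','y'] 3 ∨ x = pvRep l n ['y','y','Y'] 3)) := by
  unfold pvAddRun
  rw [pv_mem_foldl_step _ _
      (fun k x =>
        x = PySem.List.slice l none (some k) ++ ['D','d','d'] ++ PySem.List.slice l (some (k+3)) none ∨
        x = PySem.List.slice l none (some k) ++ ['d','D','d'] ++ PySem.List.slice l (some (k+3)) none ∨
        x = PySem.List.slice l none (some k) ++ ['y','Y','y'] ++ PySem.List.slice l (some (k+3)) none ∨
        x = PySem.List.slice l none (some k) ++ ['y','y','Y'] ++ PySem.List.slice l (some (k+3)) none) x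
      (by intro c k; simp [PySem.Set.mem_add]; tauto)]
  rw [pv_mem_foldl_step _ _
      (fun k x =>
        x = PySem.List.slice l none (some k) ++ ['T','t'] ++ PySem.List.slice l (some (k+2)) none ∨
        x = PySem.List.slice l none (some k) ++ ['i','I'] ++ PySem.List.slice l (some (k+2)) none) x
      (by intro c k; simp [PySem.Set.mem_add]; tauto)]
  rw [pv_mem_foldl_step _ _
      (fun k x =>
        x = PySem.List.slice l none (some k) ++ ['F'] ++ PySem.List.slice l (some (k+1)) none) x
      (by intro c k; simp [PySem.Set.mem_add])]
  simp only [pv_exists_mem_pyRange_nat, pv_from1, pv_from2, pv_from3,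
    PySem.List.slice_to_natCast, pvRep]
  rw [or_assoc, or_assoc]

-- what the whole scan from position i puts into the set
theorem pv_memScan (l : List Char) :
    ∀ (i : Nat) (c : PySem.Set (List Char)) (x : List Char),
      x ∈ pvScanB l i c ↔ x ∈ c ∨ ∃ n : Nat, i ≤ n ∧ pvW l x n := by
  intro i c x
  induction i, c using pvScanB.induct l with
  | case1 i c hi hne ih =>
    rw [pvScanB]; simp only [dif_pos hi, dif_pos hne]
    rw [ih]
    have hWi : ¬ pvW l x i := by
      rintro (⟨hm, _⟩ | ⟨hm, _⟩ | ⟨hm, _⟩)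
      · rw [pv_M1] at hm; rw [List.getElem?_eq_getElem hi] at hm
        exact hne (Option.some.inj hm)
      · rw [pv_M2] at hm
        obtain ⟨h1, -⟩ := hm
        rw [List.getElem?_eq_getElem hi] at h1
        exact hne (Option.some.inj h1)
      · rw [pv_M3] at hm
        obtain ⟨h1, -⟩ := hm
        rw [List.getElem?_eq_getElem hi] at h1
        exact hne (Option.some.inj h1)
    constructor
    · rintro (hc | ⟨n, hn, hw⟩)
      · exact Or.inl hc
      · exact Or.inr ⟨n, by omega, hw⟩
    · rintro (hc | ⟨n, hn, hw⟩)
      · exact Or.inl hc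
      · rcases Nat.eq_or_lt_of_le hn with rfl | hlt
        · exact absurd hw hWi
        · exact Or.inr ⟨n, hlt, hw⟩
  | case2 i c hi hne ih =>
    rw [pvScanB]; simp only [dif_pos hi, dif_neg hne]
    have hs : l[i]'hi = 's' := not_not.mp hne
    set j := pvRunEnd l i with hjdef
    have hij : i < j := pv_runEnd_gt l i hi hs
    have hstop : l[j]? ≠ some 's' := pv_runEnd_stop l i
    have hall : ∀ k, i ≤ k → k < j → l[k]? = some 's' := pv_runEnd_all l i
    -- any window starting inside [i, j) lies entirely inside the run
    have hmax : ∀ n w, i ≤ n → n < j → (∀ t, t < w → l[n+t]? = some 's') → n + w ≤ j := by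
      intro n w hn hnj hw
      by_contra hcon
      have hjw : j < n + w := by omega
      have := hw (j - n) (by omega)
      rw [(by omega : n + (j - n) = j)] at this
      exact hstop this
    rw [ih, pv_memAddRun]
    constructor
    · rintro ((hc | ⟨n, hn, hb, hx⟩ | ⟨n, hn, hb, hx⟩ | ⟨n, hn, hb, hx⟩) | ⟨n, hn, hw⟩)
      · exact Or.inl hc
      · refine Or.inr ⟨n, hn, Or.inl ⟨?_, hx⟩⟩
        rw [pv_M1]; exact hall n hn (by omega)
      · refine Or.inr ⟨n, hn, Or.inr (Or.inl ⟨?_, hx⟩)⟩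
        rw [pv_M2]; exact ⟨hall n hn (by omega), hall (n+1) (by omega) (by omega)⟩
      · refine Or.inr ⟨n, hn, Or.inr (Or.inr ⟨?_, hx⟩)⟩
        rw [pv_M3]
        exact ⟨hall n hn (by omega), hall (n+1) (by omega) (by omega),
          hall (n+2) (by omega) (by omega)⟩
      · exact Or.inr ⟨n, by omega, hw⟩
    · rintro (hc | ⟨n, hn, hw⟩)
      · exact Or.inl (Or.inl hc)
      · by_cases hnj : j ≤ n
        · exact Or.inr ⟨n, hnj, hw⟩
        · rw [not_le] at hnj
          rcases hw with ⟨hm, hx⟩ | ⟨hm, hx⟩ | ⟨hm, hx⟩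
          · exact Or.inl (Or.inr (Or.inl ⟨n, hn, by omega, hx⟩))
          · rw [pv_M2] at hm
            have hb : n + 2 ≤ j := hmax n 2 hn hnj (by
              intro t ht; interval_cases t
              · simpa using hm.1
              · simpa using hm.2)
            exact Or.inl (Or.inr (Or.inr (Or.inl ⟨n, hn, by omega, hx⟩)))
          · rw [pv_M3] at hm
            have hb : n + 3 ≤ j := hmax n 3 hn hnj (by
              intro t ht; interval_cases t
              · simpa using hm.1
              · simpa using hm.2.1
              · simpa using hm.2.2)
            exact Or.inl (Or.inr (Or.inr (Or.inr ⟨n, hn, by omega, hx⟩)))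
  | case3 i c hi =>
    rw [pvScanB]; simp only [dif_neg hi]
    constructor
    · exact Or.inl
    · rintro (hc | ⟨n, hn, hw⟩)
      · exact hc
      · exfalso
        rcases hw with ⟨hm, _⟩ | ⟨hm, _⟩ | ⟨hm, _⟩
        · have := pv_match_le l n 1 _ (by norm_num) hm rfl; omega
        · have := pv_match_le l n 2 _ (by norm_num) hm rfl; omega
        · have := pv_match_le l n 3 _ (by norm_num) hm rfl; omega

theorem pv_mem_iff (l x : List Char) :
    x ∈ pvCandsA l ↔ x ∈ pvScanB l 0 (PySem.Set.add PySem.Set.empty l) := by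
  rw [pv_memA, pv_memScan]
  have hmem : x ∈ PySem.Set.add PySem.Set.empty l ↔ x = l := by
    simp [PySem.Set.mem_add, PySem.Set.empty]
  rw [hmem]
  unfold pvW
  constructor
  · rintro (h | ⟨n, hb, hm, hx⟩ | ⟨n, hb, hm, hx⟩ | ⟨n, hb, hm, hx⟩)
    · exact Or.inl h
    · exact Or.inr ⟨n, Nat.zero_le n, Or.inl ⟨hm, hx⟩⟩
    · exact Or.inr ⟨n, Nat.zero_le n, Or.inr (Or.inl ⟨hm, hx⟩)⟩
    · exact Or.inr ⟨n, Nat.zero_le n, Or.inr (Or.inr ⟨hm, hx⟩)⟩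
  · rintro (h | ⟨n, _, (⟨hm, hx⟩ | ⟨hm, hx⟩ | ⟨hm, hx⟩)⟩)
    · exact Or.inl h
    · have := pv_match_le l n 1 _ (by norm_num) hm rfl
      exact Or.inr (Or.inl ⟨n, by omega, hm, hx⟩)
    · have := pv_match_le l n 2 _ (by norm_num) hm rfl
      exact Or.inr (Or.inr (Or.inl ⟨n, by omega, hm, hx⟩))
    · have := pv_match_le l n 3 _ (by norm_num) hm rfl
      exact Or.inr (Or.inr (Or.inr ⟨n, by omega, hm, hx⟩))

theorem pv_nodupA (l : List Char) : (pvCandsA l).Nodup := by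
  unfold pvCandsA
  apply pv_nodup_foldl_step _ _
    (by
      intro c i hc
      split_ifs
      · exact PySem.Set.nodup_add _ _ (PySem.Set.nodup_add _ _ (PySem.Set.nodup_add _ _
          (PySem.Set.nodup_add _ _ hc)))
      · exact hc)
  apply pv_nodup_foldl_step _ _
    (by
      intro c i hc
      split_ifs
      · exact PySem.Set.nodup_add _ _ (PySem.Set.nodup_add _ _ hc)
      · exact hc)
  apply pv_nodup_foldl_step _ _
    (by
      intro c i hc
      split_ifs
      · exact PySem.Set.nodup_add _ _ hc
      · exact hc)
  exact PySem.Set.nodup_add _ _ (by simp [PySem.Set.empty])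

theorem pv_nodupAddRun (l : List Char) (i j : Nat) (c : PySem.Set (List Char))
    (hc : c.Nodup) : (pvAddRun l i j c).Nodup := by
  unfold pvAddRun
  apply pv_nodup_foldl_step _ _
    (fun c k hc => PySem.Set.nodup_add _ _ (PySem.Set.nodup_add _ _
      (PySem.Set.nodup_add _ _ (PySem.Set.nodup_add _ _ hc))))
  apply pv_nodup_foldl_step _ _
    (fun c k hc => PySem.Set.nodup_add _ _ (PySem.Set.nodup_add _ _ hc))
  apply pv_nodup_foldl_step _ _
    (fun c k hc => PySem.Set.nodup_add _ _ hc)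
  exact hc

theorem pv_nodupScan (l : List Char) :
    ∀ (i : Nat) (c : PySem.Set (List Char)), c.Nodup → (pvScanB l i c).Nodup := by
  intro i c hc
  induction i, c using pvScanB.induct l with
  | case1 i c hi hne ih =>
    rw [pvScanB]; simp only [dif_pos hi, dif_pos hne]; exact ih hc
  | case2 i c hi hne ih =>
    rw [pvScanB]; simp only [dif_pos hi, dif_neg hne]
    exact ih (pv_nodupAddRun _ _ _ _ hc)
  | case3 i c hi =>
    rw [pvScanB]; simp only [dif_neg hi]; exact hc

-- ===== VERDICT (by name: the statement is the Claim_ definition above) =====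
theorem gen_foot_spec : Claim_equal_gen_foot := by
  intro input _
  unfold Spec_gen_foot gen_foot gen_foot_alt
  exact PySem.List.sorted_eq_sorted_of_perm _ _ _ (fun a b h => h)
    (List.Perm.map _
      ((List.perm_ext_iff_of_nodup (pv_nodupA _)
          (pv_nodupScan _ _ _ (PySem.Set.nodup_add _ _ (by simp [PySem.Set.empty])))).mpr
        (fun x => pv_mem_iff _ x)))
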